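-- pv_equiv track=rewrite | github.com/cry999/AtCoder | beginner/008/D.py | gold_game
-- ===== SOURCE A (Python) =====
-- def gold_game(W: int, H: int, N: int, machines: list)->int:
--     memo = {}
--
--     def dfs(sx: int, sy: int, tx: int, ty: int)->int:
--         if (sx, sy, tx, ty) in memo:
--             return memo[(sx, sy, tx, ty)]
--
--         max_gold = 0
--         for mx, my in machines:
--             if mx < sx or tx <= mx:
--                 continue
--             if my < sy or ty <= my:
--                 continue
--
--             gold = (tx-sx) + (ty-sy) - 1
--             gold += dfs(sx, sy, mx, my)      # 左下
--             gold += dfs(sx, my+1, mx, ty)    # 左上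
--             gold += dfs(mx+1, sy, tx, my)    # 右下
--             gold += dfs(mx+1, my+1, tx, ty)  # 右上
--
--             max_gold = max(max_gold, gold)
--
--         memo[(sx, sy, tx, ty)] = max_gold
--         return max_gold
--
--     return dfs(1, 1, W+1, H+1)
-- ===== SOURCE B (Python) =====
-- def gold_game(W: int, H: int, N: int, machines: list) -> int:
--     # Bottom-up DP over the rectangles the recursion can reach, filled in
--     # increasing order of semiperimeter so every sub-rectangle is ready first.
--     pts = [(m[0], m[1]) for m in machines]
--     xlo = sorted({1} | {x + 1 for x, _ in pts})
--     xhi = sorted({W + 1} | {x for x, _ in pts})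
--     ylo = sorted({1} | {y + 1 for _, y in pts})
--     yhi = sorted({H + 1} | {y for _, y in pts})
--     rects = [(sx, sy, tx, ty) for sx in xlo for tx in xhi for sy in ylo for ty in yhi]
--     rects.sort(key=lambda r: (r[2] - r[0]) + (r[3] - r[1]))
--     best = {}
--     for sx, sy, tx, ty in rects:
--         b = 0
--         for mx, my in pts:
--             if sx <= mx < tx and sy <= my < ty:
--                 g = ((tx - sx) + (ty - sy) - 1
--                      + best[(sx, sy, mx, my)]
--                      + best[(sx, my + 1, mx, ty)]
--                      + best[(mx + 1, sy, tx, my)]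
--                      + best[(mx + 1, my + 1, tx, ty)])
--                 b = max(b, g)
--         best[(sx, sy, tx, ty)] = b
--     return best[(1, 1, W + 1, H + 1)]
-- ===== Notes on version B (the rewrite author's own statement) =====
-- stated objective: alternative
-- what changed: Replaces A's top-down memoized recursion over sub-rectangles with an explicit bottom-up dynamic program: the reachable rectangle corners are enumerated up front, all candidate rectangles are sorted by semiperimeter and a table is filled iteratively so each entry only reads already-computed smaller entries.
import Mathlib
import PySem

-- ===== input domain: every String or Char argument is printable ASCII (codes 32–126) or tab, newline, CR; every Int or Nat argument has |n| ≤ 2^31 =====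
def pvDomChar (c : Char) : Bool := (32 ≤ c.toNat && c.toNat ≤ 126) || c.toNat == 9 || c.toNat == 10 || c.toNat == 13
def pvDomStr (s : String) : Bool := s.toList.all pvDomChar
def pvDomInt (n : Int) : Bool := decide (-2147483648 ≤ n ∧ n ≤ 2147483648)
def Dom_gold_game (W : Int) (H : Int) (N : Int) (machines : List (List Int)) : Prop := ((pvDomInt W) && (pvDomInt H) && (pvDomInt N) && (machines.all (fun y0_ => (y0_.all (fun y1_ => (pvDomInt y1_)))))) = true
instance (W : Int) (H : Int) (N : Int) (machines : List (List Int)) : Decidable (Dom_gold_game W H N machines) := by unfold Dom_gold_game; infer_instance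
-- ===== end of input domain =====

-- B re-implements A's top-down memoized recursion as an explicit bottom-up DP table
-- filled in increasing rectangle semiperimeter; return values agree on all inputs whose
-- machine rows are [x, y] pairs (elsewhere the Python versions raise).

-- ===== PORT A =====
-- A's dfs, with the memo dict threaded through the machine loop and a fuel argument that
-- only makes the same recursion total: (W+H).toNat + 1 always exceeds the depth A reaches.
def pvDfsA (ms : List (List Int)) (fuel : Nat) (sx sy tx ty : Int)
    (memo : PySem.Dict (Int × Int × Int × Int) Int) :
    Int × PySem.Dict (Int × Int × Int × Int) Int :=
  match fuel with
  | 0 => (0, memo)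
  | f + 1 =>
    match memo.get? (sx, sy, tx, ty) with
    | some v => (v, memo)
    | none =>
      -- the 'for mx, my in machines' loop, state = (max_gold, memo); a non-pair row
      -- makes Python raise ValueError (outside Pre_)
      let p := ms.foldl (fun (st : Int × PySem.Dict (Int × Int × Int × Int) Int) r =>
        match r with
        | [mx, my] =>
          if mx < sx ∨ tx ≤ mx then st
          else if my < sy ∨ ty ≤ my then st
          else
            let p1 := pvDfsA ms f sx sy mx my st.2
            let p2 := pvDfsA ms f sx (my + 1) mx ty p1.2
            let p3 := pvDfsA ms f (mx + 1) sy tx my p2.2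
            let p4 := pvDfsA ms f (mx + 1) (my + 1) tx ty p3.2
            (max st.1 ((tx - sx) + (ty - sy) - 1 + p1.1 + p2.1 + p3.1 + p4.1), p4.2)
        | _ => st) (0, memo)
      (p.1, p.2.insert (sx, sy, tx, ty) p.1)
  termination_by structural fuel

def gold_game (W : Int) (H : Int) (N : Int) (machines : List (List Int)) : Int :=
  (pvDfsA machines ((W + H).toNat + 1) 1 1 (W + 1) (H + 1) PySem.Dict.empty).1

-- ===== PORT B =====
-- pts = [(m[0], m[1]) for m in machines]; rows shorter than 2 make Python B raise (outside Pre_)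
def pvUnpack (machines : List (List Int)) : List (Int × Int) :=
  machines.filterMap (fun r => match r with | mx :: my :: _ => some (mx, my) | _ => none)

-- xlo = sorted({1} | {x + 1 for x, _ in pts}), etc.
def pvXlo (pts : List (Int × Int)) : List Int :=
  PySem.List.sorted (PySem.Set.ofList (1 :: pts.map (fun p => p.1 + 1))) (fun x => x) false
def pvXhi (W : Int) (pts : List (Int × Int)) : List Int :=
  PySem.List.sorted (PySem.Set.ofList ((W + 1) :: pts.map (fun p => p.1))) (fun x => x) false
def pvYlo (pts : List (Int × Int)) : List Int :=
  PySem.List.sorted (PySem.Set.ofList (1 :: pts.map (fun p => p.2 + 1))) (fun x => x) false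
def pvYhi (H : Int) (pts : List (Int × Int)) : List Int :=
  PySem.List.sorted (PySem.Set.ofList ((H + 1) :: pts.map (fun p => p.2))) (fun x => x) false

-- rects = [(sx, sy, tx, ty) for sx in xlo for tx in xhi for sy in ylo for ty in yhi]
def pvRects (W H : Int) (pts : List (Int × Int)) : List (Int × Int × Int × Int) :=
  (pvXlo pts).flatMap (fun sx => (pvXhi W pts).flatMap (fun tx =>
    (pvYlo pts).flatMap (fun sy => (pvYhi H pts).map (fun ty => (sx, sy, tx, ty)))))

-- the sort key (r[2] - r[0]) + (r[3] - r[1])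
def pvSize (r : Int × Int × Int × Int) : Int := (r.2.2.1 - r.1) + (r.2.2.2 - r.2.1)

-- the inner 'for mx, my in pts' loop computing one table entry
def pvInner (pts : List (Int × Int)) (best : PySem.Dict (Int × Int × Int × Int) Int)
    (r : Int × Int × Int × Int) : Int :=
  pts.foldl (fun b m =>
    if r.1 ≤ m.1 ∧ m.1 < r.2.2.1 ∧ r.2.1 ≤ m.2 ∧ m.2 < r.2.2.2 then
      max b (pvSize r - 1
        + best.getD (r.1, r.2.1, m.1, m.2) 0
        + best.getD (r.1, m.2 + 1, m.1, r.2.2.2) 0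
        + best.getD (m.1 + 1, r.2.1, r.2.2.1, m.2) 0
        + best.getD (m.1 + 1, m.2 + 1, r.2.2.1, r.2.2.2) 0)
    else b) 0

-- best[(sx, sy, tx, ty)] = <inner loop value>
def pvFill (pts : List (Int × Int)) (best : PySem.Dict (Int × Int × Int × Int) Int)
    (r : Int × Int × Int × Int) : PySem.Dict (Int × Int × Int × Int) Int :=
  best.insert r (pvInner pts best r)

def gold_game_alt (W : Int) (H : Int) (N : Int) (machines : List (List Int)) : Int :=
  let pts := pvUnpack machines
  let order := PySem.List.sorted (pvRects W H pts) pvSize false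
  let best := order.foldl (pvFill pts) PySem.Dict.empty
  best.getD (1, 1, W + 1, H + 1) 0

-- ===== PRECONDITION & SPEC =====
-- Pre_ admits exactly the machine lists whose rows are [x, y] pairs: on any other row
-- Python A raises ValueError (unpacking) and Python B raises IndexError or ignores extras.
def Pre_gold_game (W : Int) (H : Int) (N : Int) (machines : List (List Int)) : Prop :=
  ∀ r ∈ machines, r.length = 2
instance (W : Int) (H : Int) (N : Int) (machines : List (List Int)) : Decidable (Pre_gold_game W H N machines) := by unfold Pre_gold_game; infer_instance

def pvWitness_gold_game : Int × Int × Int × List (List Int) := (2, 2, 1, [[1, 1]])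

def Spec_gold_game (W : Int) (H : Int) (N : Int) (machines : List (List Int)) (out : Int) : Prop := out = gold_game_alt W H N machines
instance (W : Int) (H : Int) (N : Int) (machines : List (List Int)) (out : Int) : Decidable (Spec_gold_game W H N machines out) := by unfold Spec_gold_game; infer_instance

-- ===== CLAIM (what is proved, stated in full; the proofs are below) =====
def Claim_equal_gold_game : Prop := ∀ (W : Int) (H : Int) (N : Int) (machines : List (List Int)), Dom_gold_game W H N machines → Pre_gold_game W H N machines → Spec_gold_game W H N machines (gold_game W H N machines)

-- ===== LEMMAS AND PROOFS =====

-- termination measure of A's recursion: the rectangle's semiperimeter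
def pvMu (sx sy tx ty : Int) : Nat := ((tx - sx) + (ty - sy)).toNat

-- the mathematical value of A's dfs, by well-founded recursion on the semiperimeter
def pvVal (ms : List (List Int)) (sx sy tx ty : Int) : Int :=
  ms.foldl (fun best r =>
    match r with
    | [mx, my] =>
      if _h1 : mx < sx ∨ tx ≤ mx then best
      else if _h2 : my < sy ∨ ty ≤ my then best
      else max best ((tx - sx) + (ty - sy) - 1
        + pvVal ms sx sy mx my
        + pvVal ms sx (my + 1) mx ty
        + pvVal ms (mx + 1) sy tx my
        + pvVal ms (mx + 1) (my + 1) tx ty)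
    | _ => best) 0
  termination_by pvMu sx sy tx ty
  decreasing_by all_goals (simp only [pvMu]; omega)

-- the pure body of A's machine loop, recursive calls replaced by pvVal
def pvStep (ms : List (List Int)) (sx sy tx ty : Int) (best : Int) (r : List Int) : Int :=
  match r with
  | [mx, my] =>
    if mx < sx ∨ tx ≤ mx then best
    else if my < sy ∨ ty ≤ my then best
    else max best ((tx - sx) + (ty - sy) - 1
      + pvVal ms sx sy mx my
      + pvVal ms sx (my + 1) mx ty
      + pvVal ms (mx + 1) sy tx my
      + pvVal ms (mx + 1) (my + 1) tx ty)
  | _ => best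

theorem pvVal_eq (ms : List (List Int)) (sx sy tx ty : Int) :
    pvVal ms sx sy tx ty = ms.foldl (pvStep ms sx sy tx ty) 0 := by
  rw [pvVal]
  apply PySem.List.foldl_congr_mem
  intro acc r _hr
  rcases r with _ | ⟨mx, _ | ⟨my, _ | ⟨z, zs⟩⟩⟩ <;> simp [pvStep]

-- a memo is good when every stored entry is the true dfs value of its rectangle
def pvGood (ms : List (List Int)) (memo : PySem.Dict (Int × Int × Int × Int) Int) : Prop :=
  ∀ k v, memo.get? k = some v → v = pvVal ms k.1 k.2.1 k.2.2.1 k.2.2.2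

-- the loop body of pvDfsA, named for the proofs
def pvStepA (ms : List (List Int)) (f : Nat) (sx sy tx ty : Int)
    (st : Int × PySem.Dict (Int × Int × Int × Int) Int) (r : List Int) :
    Int × PySem.Dict (Int × Int × Int × Int) Int :=
  match r with
  | [mx, my] =>
    if mx < sx ∨ tx ≤ mx then st
    else if my < sy ∨ ty ≤ my then st
    else
      let p1 := pvDfsA ms f sx sy mx my st.2
      let p2 := pvDfsA ms f sx (my + 1) mx ty p1.2
      let p3 := pvDfsA ms f (mx + 1) sy tx my p2.2
      let p4 := pvDfsA ms f (mx + 1) (my + 1) tx ty p3.2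
      (max st.1 ((tx - sx) + (ty - sy) - 1 + p1.1 + p2.1 + p3.1 + p4.1), p4.2)
  | _ => st

theorem pvDfsA_succ (ms : List (List Int)) (f : Nat) (sx sy tx ty : Int)
    (memo : PySem.Dict (Int × Int × Int × Int) Int) :
    pvDfsA ms (f + 1) sx sy tx ty memo =
      match memo.get? (sx, sy, tx, ty) with
      | some v => (v, memo)
      | none =>
        let p := ms.foldl (pvStepA ms f sx sy tx ty) (0, memo)
        (p.1, p.2.insert (sx, sy, tx, ty) p.1) := rfl

theorem pvFoldA_correct (ms : List (List Int)) (fuel : Nat)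
    (hdfs : ∀ (sx sy tx ty : Int) (memo : PySem.Dict (Int × Int × Int × Int) Int),
      pvGood ms memo → pvMu sx sy tx ty + 1 ≤ fuel →
      (pvDfsA ms fuel sx sy tx ty memo).1 = pvVal ms sx sy tx ty ∧
        pvGood ms (pvDfsA ms fuel sx sy tx ty memo).2)
    (sx sy tx ty : Int) (hfuel : pvMu sx sy tx ty ≤ fuel) :
    ∀ (rows : List (List Int)) (best : Int) (memo : PySem.Dict (Int × Int × Int × Int) Int),
      pvGood ms memo →
      (rows.foldl (pvStepA ms fuel sx sy tx ty) (best, memo)).1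
          = rows.foldl (pvStep ms sx sy tx ty) best ∧
        pvGood ms (rows.foldl (pvStepA ms fuel sx sy tx ty) (best, memo)).2 := by
  intro rows
  induction rows with
  | nil => intro best memo hg; exact ⟨rfl, hg⟩
  | cons r rest ih =>
    intro best memo hg
    rcases r with _ | ⟨mx, _ | ⟨my, _ | ⟨z, zs⟩⟩⟩
    · simpa [pvStepA, pvStep] using ih best memo hg
    · simpa [pvStepA, pvStep] using ih best memo hg
    · by_cases h1 : mx < sx ∨ tx ≤ mx
      · simpa [pvStepA, pvStep, h1] using ih best memo hg
      · by_cases h2 : my < sy ∨ ty ≤ my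
        · simpa [pvStepA, pvStep, h1, h2] using ih best memo hg
        · have hx1 : sx ≤ mx := by omega
          have hx2 : mx < tx := by omega
          have hy1 : sy ≤ my := by omega
          have hy2 : my < ty := by omega
          have hb1 : pvMu sx sy mx my + 1 ≤ fuel := by
            simp only [pvMu] at hfuel ⊢; omega
          have hb2 : pvMu sx (my + 1) mx ty + 1 ≤ fuel := by
            simp only [pvMu] at hfuel ⊢; omega
          have hb3 : pvMu (mx + 1) sy tx my + 1 ≤ fuel := by
            simp only [pvMu] at hfuel ⊢; omega
          have hb4 : pvMu (mx + 1) (my + 1) tx ty + 1 ≤ fuel := by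
            simp only [pvMu] at hfuel ⊢; omega
          obtain ⟨e1, g1⟩ := hdfs sx sy mx my memo hg hb1
          obtain ⟨e2, g2⟩ := hdfs sx (my + 1) mx ty _ g1 hb2
          obtain ⟨e3, g3⟩ := hdfs (mx + 1) sy tx my _ g2 hb3
          obtain ⟨e4, g4⟩ := hdfs (mx + 1) (my + 1) tx ty _ g3 hb4
          have hstep : pvStepA ms fuel sx sy tx ty (best, memo) [mx, my]
              = (max best ((tx - sx) + (ty - sy) - 1
                  + (pvDfsA ms fuel sx sy mx my memo).1
                  + (pvDfsA ms fuel sx (my + 1) mx ty (pvDfsA ms fuel sx sy mx my memo).2).1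
                  + (pvDfsA ms fuel (mx + 1) sy tx my
                      (pvDfsA ms fuel sx (my + 1) mx ty (pvDfsA ms fuel sx sy mx my memo).2).2).1
                  + (pvDfsA ms fuel (mx + 1) (my + 1) tx ty
                      (pvDfsA ms fuel (mx + 1) sy tx my
                        (pvDfsA ms fuel sx (my + 1) mx ty
                          (pvDfsA ms fuel sx sy mx my memo).2).2).2).1),
                 (pvDfsA ms fuel (mx + 1) (my + 1) tx ty
                   (pvDfsA ms fuel (mx + 1) sy tx my
                     (pvDfsA ms fuel sx (my + 1) mx ty
                       (pvDfsA ms fuel sx sy mx my memo).2).2).2).2) := by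
            simp only [pvStepA]
            rw [if_neg h1, if_neg h2]
          simp only [List.foldl_cons, hstep]
          refine ⟨?_, (ih _ _ g4).2⟩
          rw [(ih _ _ g4).1]
          simp only [pvStep, e1, e2, e3, e4]
          rw [if_neg h1, if_neg h2]
    · simpa [pvStepA, pvStep] using ih best memo hg

theorem pvDfsA_correct (ms : List (List Int)) :
    ∀ (fuel : Nat) (sx sy tx ty : Int) (memo : PySem.Dict (Int × Int × Int × Int) Int),
      pvGood ms memo → pvMu sx sy tx ty + 1 ≤ fuel →
      (pvDfsA ms fuel sx sy tx ty memo).1 = pvVal ms sx sy tx ty ∧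
        pvGood ms (pvDfsA ms fuel sx sy tx ty memo).2 := by
  intro fuel
  induction fuel using Nat.strong_induction_on with
  | _ fuel ih =>
    intro sx sy tx ty memo hg hb
    match fuel, hb with
    | f + 1, hb =>
      have hloop := pvFoldA_correct ms f
        (fun a b c d memo' hg' hb' => ih f (by omega) a b c d memo' hg' hb')
        sx sy tx ty (by omega) ms 0 memo hg
      rw [pvDfsA_succ]
      cases hmem : memo.get? (sx, sy, tx, ty) with
      | some v => exact ⟨hg _ _ hmem, hg⟩
      | none =>
        constructor
        · simpa using hloop.1.trans (pvVal_eq ms sx sy tx ty).symm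
        · intro k v hk
          simp only at hk
          rw [PySem.Dict.get?_insert] at hk
          by_cases hkey : k = (sx, sy, tx, ty)
          · subst hkey
            rw [if_pos rfl] at hk
            injection hk with hk
            rw [← hk, hloop.1, ← pvVal_eq]
          · rw [if_neg hkey] at hk
            exact hloop.2 _ _ hk

theorem gold_game_eq_pvVal (W H N : Int) (machines : List (List Int)) :
    gold_game W H N machines = pvVal machines 1 1 (W + 1) (H + 1) := by
  have h := pvDfsA_correct machines ((W + H).toNat + 1) 1 1 (W + 1) (H + 1) PySem.Dict.empty
    (fun k v hk => by simp [PySem.Dict.get?_empty] at hk)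
    (by simp only [pvMu]; omega)
  simpa [gold_game] using h.1

-- A's loop body over an unpacked (x, y) point, with B's combined guard
def pvPtsStep (msAll : List (List Int)) (sx sy tx ty : Int) (b : Int) (m : Int × Int) : Int :=
  if sx ≤ m.1 ∧ m.1 < tx ∧ sy ≤ m.2 ∧ m.2 < ty then
    max b ((tx - sx) + (ty - sy) - 1
      + pvVal msAll sx sy m.1 m.2
      + pvVal msAll sx (m.2 + 1) m.1 ty
      + pvVal msAll (m.1 + 1) sy tx m.2
      + pvVal msAll (m.1 + 1) (m.2 + 1) tx ty)
  else b

theorem pvStep_pair (msAll : List (List Int)) (sx sy tx ty acc mx my : Int) :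
    pvStep msAll sx sy tx ty acc [mx, my] = pvPtsStep msAll sx sy tx ty acc (mx, my) := by
  simp only [pvStep, pvPtsStep]
  split_ifs <;> first | rfl | omega

theorem pvFold_rows_eq_pts (msAll : List (List Int)) (sx sy tx ty : Int) :
    ∀ (ms : List (List Int)), (∀ r ∈ ms, r.length = 2) → ∀ (acc : Int),
      ms.foldl (pvStep msAll sx sy tx ty) acc
        = (pvUnpack ms).foldl (pvPtsStep msAll sx sy tx ty) acc := by
  intro ms
  induction ms with
  | nil => intro _ acc; rfl
  | cons r rest ih =>
    intro hpre acc
    have hr : r.length = 2 := hpre r (List.mem_cons_self)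
    rcases r with _ | ⟨mx, _ | ⟨my, _ | ⟨z, zs⟩⟩⟩ <;> simp at hr
    have hrest : ∀ r ∈ rest, r.length = 2 := fun r h => hpre r (List.mem_cons_of_mem _ h)
    simp only [pvUnpack, List.filterMap_cons, List.foldl_cons]
    rw [pvStep_pair]
    exact ih hrest _

theorem pvVal_eq_pts (ms : List (List Int)) (hpre : ∀ r ∈ ms, r.length = 2)
    (sx sy tx ty : Int) :
    pvVal ms sx sy tx ty = (pvUnpack ms).foldl (pvPtsStep ms sx sy tx ty) 0 := by
  rw [pvVal_eq]
  exact pvFold_rows_eq_pts ms sx sy tx ty ms hpre 0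

-- membership facts for the compressed boundary lists
theorem pvMem_xlo_one (pts : List (Int × Int)) : (1 : Int) ∈ pvXlo pts := by
  simp [pvXlo, PySem.List.mem_sorted, PySem.Set.mem_ofList]
theorem pvMem_xlo (pts : List (Int × Int)) (m : Int × Int) (h : m ∈ pts) :
    m.1 + 1 ∈ pvXlo pts := by
  simp only [pvXlo, PySem.List.mem_sorted, PySem.Set.mem_ofList, List.mem_cons, List.mem_map]
  exact Or.inr ⟨m, h, rfl⟩
theorem pvMem_xhi_top (W : Int) (pts : List (Int × Int)) : W + 1 ∈ pvXhi W pts := by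
  simp [pvXhi, PySem.List.mem_sorted, PySem.Set.mem_ofList]
theorem pvMem_xhi (W : Int) (pts : List (Int × Int)) (m : Int × Int) (h : m ∈ pts) :
    m.1 ∈ pvXhi W pts := by
  simp only [pvXhi, PySem.List.mem_sorted, PySem.Set.mem_ofList, List.mem_cons, List.mem_map]
  exact Or.inr ⟨m, h, rfl⟩
theorem pvMem_ylo_one (pts : List (Int × Int)) : (1 : Int) ∈ pvYlo pts := by
  simp [pvYlo, PySem.List.mem_sorted, PySem.Set.mem_ofList]
theorem pvMem_ylo (pts : List (Int × Int)) (m : Int × Int) (h : m ∈ pts) :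
    m.2 + 1 ∈ pvYlo pts := by
  simp only [pvYlo, PySem.List.mem_sorted, PySem.Set.mem_ofList, List.mem_cons, List.mem_map]
  exact Or.inr ⟨m, h, rfl⟩
theorem pvMem_yhi_top (H : Int) (pts : List (Int × Int)) : H + 1 ∈ pvYhi H pts := by
  simp [pvYhi, PySem.List.mem_sorted, PySem.Set.mem_ofList]
theorem pvMem_yhi (H : Int) (pts : List (Int × Int)) (m : Int × Int) (h : m ∈ pts) :
    m.2 ∈ pvYhi H pts := by
  simp only [pvYhi, PySem.List.mem_sorted, PySem.Set.mem_ofList, List.mem_cons, List.mem_map]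
  exact Or.inr ⟨m, h, rfl⟩

theorem pvMem_rects (W H : Int) (pts : List (Int × Int)) (a b c d : Int) :
    (a, b, c, d) ∈ pvRects W H pts ↔
      (a ∈ pvXlo pts ∧ b ∈ pvYlo pts ∧ c ∈ pvXhi W pts ∧ d ∈ pvYhi H pts) := by
  simp only [pvRects, List.mem_flatMap, List.mem_map]
  constructor
  · rintro ⟨sx, hsx, tx, htx, sy, hsy, ty, hty, heq⟩
    have heq' : sx = a ∧ sy = b ∧ tx = c ∧ ty = d := by
      simp [Prod.ext_iff] at heq
      tauto
    obtain ⟨rfl, rfl, rfl, rfl⟩ := heq'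
    exact ⟨hsx, hsy, htx, hty⟩
  · rintro ⟨ha, hb, hc, hd⟩
    exact ⟨a, ha, c, hc, b, hb, ⟨d, hd, rfl⟩⟩

-- an element of the sorted list with strictly smaller key lies in the processed prefix
theorem pvMem_done (rl done todo : List (Int × Int × Int × Int)) (r k : Int × Int × Int × Int)
    (hsplit : rl = done ++ r :: todo)
    (hpair : rl.Pairwise (fun a b => pvSize a ≤ pvSize b))
    (hk : k ∈ rl) (hlt : pvSize k < pvSize r) : k ∈ done := by
  subst hsplit
  rcases List.mem_append.mp hk with h | h
  · exact h
  · exfalso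
    have hp2 : (r :: todo).Pairwise (fun a b => pvSize a ≤ pvSize b) :=
      (List.pairwise_append.mp hpair).2.1
    rcases List.mem_cons.mp h with rfl | h
    · omega
    · have := (List.pairwise_cons.mp hp2).1 k h
      omega

-- the table-filling invariant: every processed rectangle holds its true dfs value
theorem pvFill_fold (W H : Int) (ms : List (List Int)) (hpre : ∀ r ∈ ms, r.length = 2) :
    ∀ (todo done : List (Int × Int × Int × Int))
      (best : PySem.Dict (Int × Int × Int × Int) Int),
      PySem.List.sorted (pvRects W H (pvUnpack ms)) pvSize false = done ++ todo →
      (∀ k ∈ done, best.get? k = some (pvVal ms k.1 k.2.1 k.2.2.1 k.2.2.2)) →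
      ∀ k ∈ PySem.List.sorted (pvRects W H (pvUnpack ms)) pvSize false,
        (todo.foldl (pvFill (pvUnpack ms)) best).get? k
          = some (pvVal ms k.1 k.2.1 k.2.2.1 k.2.2.2) := by
  intro todo
  induction todo with
  | nil =>
    intro done best hsplit hbest k hk
    rw [hsplit, List.append_nil] at hk
    exact hbest k hk
  | cons r todo ih =>
    intro done best hsplit hbest k hk
    -- the current entry is computed correctly
    have hrl : r ∈ PySem.List.sorted (pvRects W H (pvUnpack ms)) pvSize false := by
      rw [hsplit]; exact List.mem_append.mpr (Or.inr (List.mem_cons_self))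
    have hpair := PySem.List.sorted_pairwise (pvRects W H (pvUnpack ms)) pvSize
    obtain ⟨a, b, c, d⟩ := r
    have hmem := (pvMem_rects W H (pvUnpack ms) a b c d).mp
      ((PySem.List.mem_sorted _ _ _ _).mp hrl)
    have hinner : pvInner (pvUnpack ms) best (a, b, c, d) = pvVal ms a b c d := by
      rw [pvVal_eq_pts ms hpre a b c d]
      unfold pvInner
      apply PySem.List.foldl_congr_mem
      intro acc m hm
      by_cases hc : a ≤ m.1 ∧ m.1 < c ∧ b ≤ m.2 ∧ m.2 < d
      · obtain ⟨h1, h2, h3, h4⟩ := id hc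
        have hs1 : best.get? (a, b, m.1, m.2) = some (pvVal ms a b m.1 m.2) := by
          apply hbest
          apply pvMem_done _ done todo _ _ hsplit hpair
          · rw [PySem.List.mem_sorted, pvMem_rects]
            exact ⟨hmem.1, hmem.2.1, pvMem_xhi W _ m hm, pvMem_yhi H _ m hm⟩
          · simp only [pvSize]; omega
        have hs2 : best.get? (a, m.2 + 1, m.1, d) = some (pvVal ms a (m.2 + 1) m.1 d) := by
          apply hbest
          apply pvMem_done _ done todo _ _ hsplit hpair
          · rw [PySem.List.mem_sorted, pvMem_rects]
            exact ⟨hmem.1, pvMem_ylo _ m hm, pvMem_xhi W _ m hm, hmem.2.2.2⟩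
          · simp only [pvSize]; omega
        have hs3 : best.get? (m.1 + 1, b, c, m.2) = some (pvVal ms (m.1 + 1) b c m.2) := by
          apply hbest
          apply pvMem_done _ done todo _ _ hsplit hpair
          · rw [PySem.List.mem_sorted, pvMem_rects]
            exact ⟨pvMem_xlo _ m hm, hmem.2.1, hmem.2.2.1, pvMem_yhi H _ m hm⟩
          · simp only [pvSize]; omega
        have hs4 : best.get? (m.1 + 1, m.2 + 1, c, d) = some (pvVal ms (m.1 + 1) (m.2 + 1) c d) := by
          apply hbest
          apply pvMem_done _ done todo _ _ hsplit hpair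
          · rw [PySem.List.mem_sorted, pvMem_rects]
            exact ⟨pvMem_xlo _ m hm, pvMem_ylo _ m hm, hmem.2.2.1, hmem.2.2.2⟩
          · simp only [pvSize]; omega
        simp only [pvPtsStep, if_pos hc]
        simp only [PySem.Dict.getD_eq_get?_getD, hs1, hs2, hs3, hs4, Option.getD_some]
        simp [pvSize]
      · simp only [pvPtsStep]
        rw [if_neg hc, if_neg hc]
    -- apply the induction hypothesis with the extended prefix
    simp only [List.foldl_cons]
    have hstep : pvFill (pvUnpack ms) best (a, b, c, d)
        = best.insert (a, b, c, d) (pvVal ms a b c d) := by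
      rw [pvFill, hinner]
    rw [hstep]
    apply ih (done ++ [(a, b, c, d)])
    · rw [hsplit, List.append_assoc]; rfl
    · intro k' hk'
      rw [PySem.Dict.get?_insert]
      by_cases hkey : k' = (a, b, c, d)
      · subst hkey; rw [if_pos rfl]
      · rw [if_neg hkey]
        rcases List.mem_append.mp hk' with h | h
        · exact hbest k' h
        · simp at h; exact absurd h hkey
    · exact hk

theorem gold_game_alt_eq_pvVal (W H N : Int) (machines : List (List Int))
    (hpre : ∀ r ∈ machines, r.length = 2) :
    gold_game_alt W H N machines = pvVal machines 1 1 (W + 1) (H + 1) := by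
  have htop : ((1 : Int), (1 : Int), W + 1, H + 1)
      ∈ PySem.List.sorted (pvRects W H (pvUnpack machines)) pvSize false := by
    rw [PySem.List.mem_sorted, pvMem_rects]
    exact ⟨pvMem_xlo_one _, pvMem_ylo_one _, pvMem_xhi_top W _, pvMem_yhi_top H _⟩
  have h := pvFill_fold W H machines hpre
    (PySem.List.sorted (pvRects W H (pvUnpack machines)) pvSize false) []
    PySem.Dict.empty rfl (by intro k hk; simp at hk) _ htop
  unfold gold_game_alt
  show (List.foldl (pvFill (pvUnpack machines)) PySem.Dict.empty
      (PySem.List.sorted (pvRects W H (pvUnpack machines)) pvSize false)).getD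
      (1, 1, W + 1, H + 1) 0 = pvVal machines 1 1 (W + 1) (H + 1)
  rw [PySem.Dict.getD_eq_get?_getD, h]
  rfl

-- ===== VERDICT (by name: the statement is the Claim_ definition above) =====
theorem gold_game_spec : Claim_equal_gold_game := by
  intro W H N machines _hdom hpre
  unfold Spec_gold_game
  rw [gold_game_eq_pvVal, gold_game_alt_eq_pvVal W H N machines hpre]
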